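-- pv_equiv track=rewrite | github.com/vamseeachanta/digitalmodel | src/digitalmodel/hydrodynamics/diffraction/aqwa_runner.py | _detect_aqwa_error
-- ===== SOURCE A (Python) =====
-- def _detect_aqwa_error(
--     stdout: str, stderr: str, return_code: int, lis_content: str = ""
-- ) -> str | None:
--     """Detect AQWA solver errors from output streams and LIS file.
--
--     AQWA writes errors to stdout or the .LIS file and often returns
--     exit code 0 even when it fails. This method checks for known
--     error patterns in all outputs.
--
--     Returns:
--         Error message if an error is detected, None otherwise.
--     """
--     # Non-zero return code is always an error
--     if return_code != 0:
--         return stderr or f"Exit code {return_code}"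
--
--     # Error patterns to check in stdout and LIS file
--     error_patterns = [
--         "**** ERROR ****",
--         "NON-EXISTENT FILE",
--         "FATAL ERROR",
--         "ERROR IN",
--         "MESH FILE NOT FOUND",
--         "LICENSE ERROR",
--         "CANNOT OPEN",
--         "INPUT DATA ERROR",
--         "TERMINATED WITH ERRORS",
--     ]
--
--     # Check stdout for AQWA error patterns
--     stdout_upper = stdout.upper()
--     for pattern in error_patterns:
--         if pattern in stdout_upper:
--             # Extract the error line for better reporting
--             for line in stdout.strip().split("\n"):
--                 if pattern in line.upper():
--                     return line.strip()
--             return f"AQWA error detected: {pattern}"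
--
--     # Check LIS file for error patterns
--     if lis_content:
--         lis_upper = lis_content.upper()
--         for pattern in error_patterns:
--             if pattern in lis_upper:
--                 # Extract the error line from LIS
--                 for line in lis_content.strip().split("\n"):
--                     if pattern in line.upper():
--                         return f"AQWA LIS: {line.strip()}"
--                 return f"AQWA LIS error: {pattern}"
--
--     # Check if stderr has content (unusual but check anyway)
--     if stderr and stderr.strip():
--         return stderr.strip()
--
--     return None
-- ===== SOURCE B (Python) =====
-- _AQWA_ERROR_PATTERNS = [
--     "**** ERROR ****",
--     "NON-EXISTENT FILE",
--     "FATAL ERROR",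
--     "ERROR IN",
--     "MESH FILE NOT FOUND",
--     "LICENSE ERROR",
--     "CANNOT OPEN",
--     "INPUT DATA ERROR",
--     "TERMINATED WITH ERRORS",
-- ]
--
--
-- def _detect_aqwa_error(
--     stdout: str, stderr: str, return_code: int, lis_content: str = ""
-- ) -> str | None:
--     """Detect AQWA solver errors: single line-major pass per stream that keeps
--     the highest-priority (lowest-index) pattern seen and its first line."""
--     if return_code != 0:
--         return stderr or f"Exit code {return_code}"
--
--     for content, prefix in ((stdout, ""), (lis_content, "AQWA LIS: ")):
--         if not content:
--             continue
--         best = None  # (pattern priority index, stripped first line at that priority)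
--         for line in content.strip().split("\n"):
--             line_upper = line.upper()
--             for j, pattern in enumerate(_AQWA_ERROR_PATTERNS):
--                 if pattern in line_upper:
--                     if best is None or j < best[0]:
--                         best = (j, line.strip())
--                     break
--         if best is not None:
--             return prefix + best[1]
--
--     if stderr and stderr.strip():
--         return stderr.strip()
--
--     return None
-- ===== Notes on version B (the rewrite author's own statement) =====
-- stated objective: alternative
-- what changed: Replaces A's pattern-major strategy (scan the whole upper-cased stream once per pattern, then re-split and rescan the lines for the matching one) by a single line-major pass per stream that tracks the highest-priority pattern matched so far together with the first stripped line matching it.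
import Mathlib
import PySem

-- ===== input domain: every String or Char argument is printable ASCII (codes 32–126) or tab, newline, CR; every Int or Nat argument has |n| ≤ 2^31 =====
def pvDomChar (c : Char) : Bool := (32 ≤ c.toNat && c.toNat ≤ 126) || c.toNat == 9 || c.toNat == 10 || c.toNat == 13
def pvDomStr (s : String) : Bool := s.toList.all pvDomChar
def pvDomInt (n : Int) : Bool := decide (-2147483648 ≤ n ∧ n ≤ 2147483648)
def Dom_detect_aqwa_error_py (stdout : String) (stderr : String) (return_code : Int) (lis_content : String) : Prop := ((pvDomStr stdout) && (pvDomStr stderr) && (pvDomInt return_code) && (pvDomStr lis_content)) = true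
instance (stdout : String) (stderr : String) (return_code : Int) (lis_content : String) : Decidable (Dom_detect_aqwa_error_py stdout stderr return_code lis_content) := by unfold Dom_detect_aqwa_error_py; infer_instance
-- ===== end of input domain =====

-- B replaces A's pattern-major scans of each whole stream by a single line-major pass
-- tracking the highest-priority pattern seen; same return value, similar cost (alternative).

-- the AQWA error pattern list shared by both programs (pure data)
def aqwaPatterns : List (List Char) :=
  ["**** ERROR ****".toList, "NON-EXISTENT FILE".toList, "FATAL ERROR".toList,
   "ERROR IN".toList, "MESH FILE NOT FOUND".toList, "LICENSE ERROR".toList,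
   "CANNOT OPEN".toList, "INPUT DATA ERROR".toList, "TERMINATED WITH ERRORS".toList]

-- ===== PORT A =====
-- A's per-stream block: for each pattern, test the whole upper-cased stream u, then rescan
-- the stripped stream's lines for the matching line (lp = line prefix, fp = fallback prefix).
def aFindStream (c u : List Char) (pats : List (List Char)) (lp fp : List Char) : Option (List Char) :=
  match pats with
  | [] => none
  | p :: ps =>
    if PySem.Chars.isIn p u then
      match (PySem.Chars.splitOn (PySem.Chars.strip c) ['\n']).find?
              (fun l => PySem.Chars.isIn p (PySem.Chars.upper l)) with
      | some l => some (lp ++ PySem.Chars.strip l)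
      | none => some (fp ++ p)
    else aFindStream c u ps lp fp

def detect_aqwa_error_py (stdout : String) (stderr : String) (return_code : Int) (lis_content : String) : Option String :=
  if return_code ≠ 0 then
    some (if stderr.toList = [] then String.ofList ("Exit code ".toList ++ PySem.Int.toChars return_code) else stderr)
  else
    match aFindStream stdout.toList (PySem.Chars.upper stdout.toList) aqwaPatterns [] ("AQWA error detected: ".toList) with
    | some r => some (String.ofList r)
    | none =>
      match (if lis_content.toList ≠ [] then
               aFindStream lis_content.toList (PySem.Chars.upper lis_content.toList) aqwaPatterns
                 ("AQWA LIS: ".toList) ("AQWA LIS error: ".toList)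
             else none) with
      | some r => some (String.ofList r)
      | none =>
        if stderr.toList ≠ [] ∧ PySem.Chars.strip stderr.toList ≠ [] then
          some (String.ofList (PySem.Chars.strip stderr.toList))
        else none

-- ===== PORT B =====
-- B's inner loop: the line's first (= highest-priority) matching pattern index, combined
-- with the best (lowest index, earliest line) seen so far.
def bLineStep (best : Option (Nat × List Char)) (line : List Char) : Option (Nat × List Char) :=
  match List.findIdx? (fun p => PySem.Chars.isIn p (PySem.Chars.upper line)) aqwaPatterns with
  | none => best
  | some j =>
    match best with
    | none => some (j, PySem.Chars.strip line)
    | some (i, x) => if j < i then some (j, PySem.Chars.strip line) else some (i, x)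

def bScan (content : List Char) : Option (Nat × List Char) :=
  (PySem.Chars.splitOn (PySem.Chars.strip content) ['\n']).foldl bLineStep none

def detect_aqwa_error_py_alt (stdout : String) (stderr : String) (return_code : Int) (lis_content : String) : Option String :=
  if return_code ≠ 0 then
    some (if stderr.toList = [] then String.ofList ("Exit code ".toList ++ PySem.Int.toChars return_code) else stderr)
  else
    match (if stdout.toList ≠ [] then bScan stdout.toList else none) with
    | some b => some (String.ofList ([] ++ b.2))
    | none =>
      match (if lis_content.toList ≠ [] then bScan lis_content.toList else none) with
      | some b => some (String.ofList ("AQWA LIS: ".toList ++ b.2))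
      | none =>
        if stderr.toList ≠ [] ∧ PySem.Chars.strip stderr.toList ≠ [] then
          some (String.ofList (PySem.Chars.strip stderr.toList))
        else none

-- ===== PRECONDITION & SPEC =====
def Spec_detect_aqwa_error_py (stdout : String) (stderr : String) (return_code : Int) (lis_content : String) (out : Option String) : Prop := out = detect_aqwa_error_py_alt stdout stderr return_code lis_content
instance (stdout : String) (stderr : String) (return_code : Int) (lis_content : String) (out : Option String) : Decidable (Spec_detect_aqwa_error_py stdout stderr return_code lis_content out) := by unfold Spec_detect_aqwa_error_py; infer_instance

-- ===== CLAIM (what is proved, stated in full; the proofs are below) =====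
def Claim_equal_detect_aqwa_error_py : Prop := ∀ (stdout : String) (stderr : String) (return_code : Int) (lis_content : String), Dom_detect_aqwa_error_py stdout stderr return_code lis_content → Spec_detect_aqwa_error_py stdout stderr return_code lis_content (detect_aqwa_error_py stdout stderr return_code lis_content)

-- ===== LEMMAS AND PROOFS =====

-- splitting a string at '\n' as a plain structural recursion
def nlSplit : List Char → List (List Char)
  | [] => [[]]
  | c :: s => if c = '\n' then [] :: nlSplit s else (nlSplit s).modifyHead (c :: ·)

lemma nlSplit_ne_nil (s : List Char) : nlSplit s ≠ [] := by
  induction s with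
  | nil => simp [nlSplit]
  | cons c s ih =>
    simp only [nlSplit]
    split_ifs
    · simp
    · cases h : nlSplit s with
      | nil => exact absurd h ih
      | cons a t => simp

lemma modifyHead_id' (l : List (List Char)) : List.modifyHead (fun x => x) l = l := by
  cases l <;> rfl

lemma splitOn_go_nl (fuel : Nat) : ∀ (l cur : List Char) (acc : List (List Char)), l.length < fuel →
    PySem.Chars.splitOn.go ['\n'] fuel l cur acc = acc.reverse ++ (nlSplit l).modifyHead (cur.reverse ++ ·) := by
  induction fuel with
  | zero => intro l cur acc h; omega
  | succ f ih =>
    intro l cur acc h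
    cases l with
    | nil =>
      rw [PySem.Chars.splitOn.go]
      · simp [nlSplit]
      · omega
    | cons c rest =>
      rw [PySem.Chars.splitOn.go]
      by_cases hc : c = '\n'
      · subst hc
        rw [if_pos (by simp [List.isPrefixOf])]
        rw [ih _ _ _ (by simpa using h)]
        simp [nlSplit, modifyHead_id']
      · rw [if_neg (by simp [List.isPrefixOf]; exact fun hx => absurd hx.symm hc)]
        rw [ih _ _ _ (by simpa using h)]
        simp only [nlSplit, if_neg hc, List.modifyHead_modifyHead]
        have hf : (fun x : List Char => (c :: cur).reverse ++ x) = ((fun x => cur.reverse ++ x) ∘ fun x => c :: x) := by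
          funext x; simp
        rw [hf]

lemma splitOn_nl (s : List Char) : PySem.Chars.splitOn s ['\n'] = nlSplit s := by
  rw [PySem.Chars.splitOn, splitOn_go_nl _ _ _ _ (by omega)]
  simp [modifyHead_id']

-- character-level facts
lemma charEq_iff_toNat (a b : Char) : a = b ↔ a.toNat = b.toNat := by
  constructor
  · intro h; rw [h]
  · intro h; apply Char.ext; apply UInt32.toNat_inj.mp h

lemma upperChar_toNat (c : Char) : (PySem.Chars.upperChar c).toNat = if 97 ≤ c.toNat ∧ c.toNat ≤ 122 then c.toNat - 32 else c.toNat := by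
  have h1 : ('a' ≤ c) ↔ 97 ≤ c.toNat := by rw [Char.le_def, Char.toNat, UInt32.le_iff_toNat_le]; rfl
  have h2 : (c ≤ 'z') ↔ c.toNat ≤ 122 := by rw [Char.le_def, Char.toNat, UInt32.le_iff_toNat_le]; rfl
  simp only [PySem.Chars.upperChar, PySem.Chars.islower, Bool.and_eq_true, decide_eq_true_eq, h1, h2]
  split_ifs with h
  · rw [Char.toNat_ofNat, if_pos]
    left; omega
  · simp_all

lemma isspace_upperChar (c : Char) : PySem.Chars.isspace (PySem.Chars.upperChar c) = PySem.Chars.isspace c := by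
  simp only [PySem.Chars.isspace, upperChar_toNat]
  split_ifs with h
  · rw [Bool.eq_iff_iff]
    simp only [Bool.or_eq_true, Bool.and_eq_true, decide_eq_true_eq]
    omega
  · rfl

lemma upperChar_eq_nl (c : Char) : (PySem.Chars.upperChar c = '\n') ↔ c = '\n' := by
  rw [charEq_iff_toNat, charEq_iff_toNat c, upperChar_toNat]
  show _ = 10 ↔ _ = 10
  split_ifs with h <;> omega

-- upper commutes with strip and with nlSplit
lemma upper_dropWhile (t : List Char) :
    List.dropWhile PySem.Chars.isspace (t.map PySem.Chars.upperChar)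
      = (List.dropWhile PySem.Chars.isspace t).map PySem.Chars.upperChar := by
  rw [List.dropWhile_map]
  have hf : (PySem.Chars.isspace ∘ PySem.Chars.upperChar) = PySem.Chars.isspace := by
    funext x; exact isspace_upperChar x
  rw [hf]

lemma upper_strip (s : List Char) : PySem.Chars.upper (PySem.Chars.strip s) = PySem.Chars.strip (PySem.Chars.upper s) := by
  simp only [PySem.Chars.upper, PySem.Chars.strip, PySem.Chars.rstrip, PySem.Chars.lstrip]
  rw [upper_dropWhile, ← List.map_reverse, upper_dropWhile, ← List.map_reverse]

lemma modifyHead_map_nlSplit (c : Char) (L : List (List Char)) :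
    List.modifyHead (fun x => PySem.Chars.upperChar c :: x) (L.map (PySem.Chars.upper))
      = (List.modifyHead (fun x => c :: x) L).map PySem.Chars.upper := by
  cases L <;> rfl

lemma nlSplit_upper (s : List Char) : nlSplit (PySem.Chars.upper s) = (nlSplit s).map PySem.Chars.upper := by
  induction s with
  | nil => rfl
  | cons c s ih =>
    have ih' : nlSplit (List.map PySem.Chars.upperChar s) = List.map PySem.Chars.upper (nlSplit s) := by
      simpa [PySem.Chars.upper] using ih
    simp only [PySem.Chars.upper, List.map_cons]
    by_cases hc : c = '\n'
    · rw [nlSplit, if_pos ((upperChar_eq_nl c).mpr hc), ih']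
      conv_rhs => rw [nlSplit, if_pos hc]
      simp [PySem.Chars.upper]
    · rw [nlSplit, if_neg (fun hx => hc ((upperChar_eq_nl c).mp hx)), ih']
      conv_rhs => rw [nlSplit, if_neg hc]
      exact modifyHead_map_nlSplit c (nlSplit s)

-- an occurrence with a non-space first character survives dropping leading whitespace
lemma infix_dropWhile_isspace (p s : List Char) (hp : p ≠ []) (hh : PySem.Chars.isspace p.headI = false) :
    p <:+: s → p <:+: List.dropWhile PySem.Chars.isspace s := by
  induction s with
  | nil => simp
  | cons c s ih =>
    intro h
    by_cases sp : PySem.Chars.isspace c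
    · rw [List.dropWhile_cons, if_pos sp]
      rcases List.infix_cons_iff.mp h with hpre | hinf
      · cases p with
        | nil => exact absurd rfl hp
        | cons a q =>
          have : a = c := (List.cons_prefix_cons.mp hpre).1
          rw [List.headI_cons] at hh
          rw [this] at hh
          rw [hh] at sp
          exact absurd sp (by simp)
      · exact ih hinf
    · rw [List.dropWhile_cons, if_neg sp]
      exact h

lemma headI_reverse' (l : List Char) : l.reverse.headI = l.getLastI := by
  cases h : l.reverse with
  | nil => simp [List.reverse_eq_nil_iff.mp h, List.getLastI_eq_getLast?_getD]
  | cons a t =>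
    have hl : l.getLast? = some a := by rw [← List.head?_reverse, h]; rfl
    simp [List.getLastI_eq_getLast?_getD, hl]

lemma reverse_dropWhile_prefix (t : List Char) (p : Char → Bool) : (List.dropWhile p t.reverse).reverse <+: t := by
  conv_rhs => rw [← List.reverse_reverse t]
  exact List.reverse_prefix.mpr (List.dropWhile_suffix p)

lemma infix_strip_iff (p s : List Char) (hp : p ≠ []) (hh : PySem.Chars.isspace p.headI = false) (hl : PySem.Chars.isspace p.getLastI = false) :
    p <:+: s ↔ p <:+: PySem.Chars.strip s := by
  constructor
  · intro h
    have h1 : p <:+: PySem.Chars.lstrip s := infix_dropWhile_isspace p s hp hh h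
    rw [PySem.Chars.strip, PySem.Chars.rstrip, ← List.reverse_infix, List.reverse_reverse]
    apply infix_dropWhile_isspace
    · simpa using hp
    · rwa [headI_reverse']
    · exact List.reverse_infix.mpr h1
  · intro h
    apply h.trans
    have h2 : PySem.Chars.strip s <+: PySem.Chars.lstrip s := reverse_dropWhile_prefix _ _
    have h3 : PySem.Chars.lstrip s <:+ s := List.dropWhile_suffix _
    exact h2.isInfix.trans h3.isInfix

-- the head of nlSplit is the longest newline-free prefix
lemma nlSplit_headI (s : List Char) : (nlSplit s).headI = s.takeWhile (fun c => !(c == '\n')) := by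
  induction s with
  | nil => rfl
  | cons c s ih =>
    by_cases hc : c = '\n'
    · subst hc
      rw [nlSplit, if_pos rfl]
      simp
    · rw [nlSplit, if_neg hc, List.takeWhile_cons]
      have : (!(c == '\n')) = true := by simpa using hc
      rw [this]
      cases h : nlSplit s with
      | nil => exact absurd h (nlSplit_ne_nil s)
      | cons a t =>
        rw [h] at ih
        simp [ih.symm]

lemma prefix_takeWhile (p : List Char) (q : Char → Bool) : ∀ s, p <+: s → (∀ a ∈ p, q a = true) → p <+: s.takeWhile q := by
  induction p with
  | nil => intro s _ _; simp
  | cons a p ih =>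
    intro s hps hq
    cases s with
    | nil => exact absurd hps (by simp)
    | cons b s =>
      obtain ⟨hab, hps'⟩ := List.cons_prefix_cons.mp hps
      subst hab
      rw [List.takeWhile_cons, if_pos (hq a (by simp))]
      exact List.cons_prefix_cons.mpr ⟨rfl, ih s hps' (fun x hx => hq x (by simp [hx]))⟩

lemma infix_nlSplit (p s : List Char) (hnl : '\n' ∉ p) :
    p <:+: s ↔ ∃ l ∈ nlSplit s, p <:+: l := by
  induction s with
  | nil =>
    simp [nlSplit]
  | cons c s ih =>
    by_cases hc : c = '\n'
    · subst hc
      rw [nlSplit, if_pos rfl]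
      by_cases hp : p = []
      · subst hp
        simp
      · constructor
        · intro h
          rcases List.infix_cons_iff.mp h with hpre | hinf
          · cases p with
            | nil => exact absurd rfl hp
            | cons a q =>
              have ha : a = '\n' := (List.cons_prefix_cons.mp hpre).1
              subst ha
              exact absurd (by simp) hnl
          · rcases ih.mp hinf with ⟨l, hl, hpl⟩
            exact ⟨l, by simp [hl], hpl⟩
        · rintro ⟨l, hl, hpl⟩
          rcases List.mem_cons.mp hl with rfl | hl'
          · exact absurd (List.eq_nil_of_infix_nil hpl) hp
          · exact List.infix_cons (ih.mpr ⟨l, by simp [hl'], hpl⟩)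
    · rw [nlSplit, if_neg hc]
      obtain ⟨h0, t, hsplit⟩ : ∃ h0 t, nlSplit s = h0 :: t := by
        cases h : nlSplit s with
        | nil => exact absurd h (nlSplit_ne_nil s)
        | cons a t => exact ⟨a, t, rfl⟩
      have hhead : h0 = s.takeWhile (fun c => !(c == '\n')) := by
        have := nlSplit_headI s
        rw [hsplit] at this
        simpa using this
      rw [hsplit]
      have key : p <+: c :: s ↔ p <+: c :: h0 := by
        constructor
        · intro h
          have := prefix_takeWhile p (fun c => !(c == '\n')) (c :: s) h
            (fun a ha => by
              have hne : a ≠ '\n' := fun hx => hnl (hx ▸ ha)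
              simp [hne])
          rwa [List.takeWhile_cons, if_pos (by simpa using hc), ← hhead] at this
        · intro h
          apply h.trans
          apply List.cons_prefix_cons.mpr
          exact ⟨rfl, hhead ▸ List.takeWhile_prefix _⟩
      rw [hsplit] at ih
      constructor
      · intro h
        rcases List.infix_cons_iff.mp h with hpre | hinf
        · exact ⟨c :: h0, by simp, (key.mp hpre).isInfix⟩
        · rcases ih.mp hinf with ⟨l, hl, hpl⟩
          rcases List.mem_cons.mp hl with rfl | hl'
          · exact ⟨c :: l, by simp, hpl.trans (List.infix_cons (List.infix_refl l))⟩
          · exact ⟨l, by simp [hl'], hpl⟩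
      · rintro ⟨l, hl, hpl⟩
        rcases List.mem_cons.mp hl with rfl | hl'
        · rcases List.infix_cons_iff.mp hpl with hpre | hinf
          · exact (key.mpr hpre).isInfix
          · have : p <:+: s := hinf.trans (hhead ▸ (List.takeWhile_prefix _).isInfix)
            exact List.infix_cons this
        · exact List.infix_cons (ih.mpr ⟨l, by simp [hl'], hpl⟩)

def goodPat (p : List Char) : Prop :=
  p ≠ [] ∧ '\n' ∉ p ∧ PySem.Chars.isspace p.headI = false ∧ PySem.Chars.isspace p.getLastI = false

-- the key bridge: "pattern in content.upper()" = "pattern in some line of content.strip()"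
lemma pattern_line_bridge (p c : List Char) (hg : goodPat p) :
    PySem.Chars.isIn p (PySem.Chars.upper c)
      = (nlSplit (PySem.Chars.strip c)).any (fun l => PySem.Chars.isIn p (PySem.Chars.upper l)) := by
  rcases hg with ⟨hne, hnl, hh, hl⟩
  rw [Bool.eq_iff_iff, PySem.Chars.isIn_iff_infix, List.any_eq_true]
  rw [infix_strip_iff p _ hne hh hl, ← upper_strip]
  rw [infix_nlSplit p _ hnl, nlSplit_upper]
  constructor
  · rintro ⟨l, hl', hpl⟩
    rcases List.mem_map.mp hl' with ⟨l0, hl0, rfl⟩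
    exact ⟨l0, hl0, (PySem.Chars.isIn_iff_infix _ _).mpr hpl⟩
  · rintro ⟨l0, hl0, hpl⟩
    exact ⟨PySem.Chars.upper l0, List.mem_map.mpr ⟨l0, hl0, rfl⟩, (PySem.Chars.isIn_iff_infix _ _).mp hpl⟩

-- B's fold as a left-biased "minimum pattern index" merge
def pvMerge (a b : Option (Nat × List Char)) : Option (Nat × List Char) :=
  match a, b with
  | none, b => b
  | some a, none => some a
  | some (i, x), some (k, y) => if k < i then some (k, y) else some (i, x)

def lineValP (pats : List (List Char)) (l : List Char) : Option (Nat × List Char) :=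
  (List.findIdx? (fun p => PySem.Chars.isIn p (PySem.Chars.upper l)) pats).map (fun j => (j, PySem.Chars.strip l))

def pureScan (pats : List (List Char)) (lines : List (List Char)) : Option (Nat × List Char) :=
  lines.foldr (fun l acc => pvMerge (lineValP pats l) acc) none

lemma pvMerge_assoc (a b c : Option (Nat × List Char)) : pvMerge (pvMerge a b) c = pvMerge a (pvMerge b c) := by
  rcases a with _ | ⟨i, x⟩ <;> rcases b with _ | ⟨k, y⟩ <;> rcases c with _ | ⟨m, z⟩ <;>
    first
      | rfl
      | (show pvMerge (if k < i then some (k, y) else some (i, x)) (some (m, z)) = _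
         split_ifs <;> first | rfl | (simp only [pvMerge]; split_ifs <;> first | rfl | omega))
      | (simp only [pvMerge]; split_ifs <;> first | rfl | (simp only [pvMerge]; split_ifs <;> first | rfl | omega))

lemma bLineStep_eq (s : Option (Nat × List Char)) (l : List Char) : bLineStep s l = pvMerge s (lineValP aqwaPatterns l) := by
  rw [bLineStep, lineValP]
  cases List.findIdx? (fun p => PySem.Chars.isIn p (PySem.Chars.upper l)) aqwaPatterns with
  | none => cases s <;> rfl
  | some j =>
    rcases s with _ | ⟨i, x⟩
    · rfl
    · simp only [Option.map_some, pvMerge]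

lemma foldl_bLineStep (lines : List (List Char)) : ∀ (s : Option (Nat × List Char)),
    lines.foldl bLineStep s = pvMerge s (pureScan aqwaPatterns lines) := by
  induction lines with
  | nil => intro s; cases s <;> rfl
  | cons l ls ih =>
    intro s
    rw [List.foldl_cons, ih, bLineStep_eq]
    rw [pvMerge_assoc]
    rfl

def shiftO (a : Option (Nat × List Char)) : Option (Nat × List Char) := a.map (fun x => (x.1 + 1, x.2))

lemma pvMerge_shift (a b : Option (Nat × List Char)) : pvMerge (shiftO a) (shiftO b) = shiftO (pvMerge a b) := by
  rcases a with _ | ⟨i, x⟩ <;> rcases b with _ | ⟨k, y⟩ <;> simp only [shiftO, Option.map_some, Option.map_none, pvMerge]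
  split_ifs with h1 h2 h2 <;> simp_all

lemma pvMerge_zero_left (x : List Char) (b : Option (Nat × List Char)) : pvMerge (some (0, x)) b = some (0, x) := by
  rcases b with _ | ⟨k, y⟩
  · rfl
  · simp [pvMerge]

lemma pvMerge_shift_zero (a : Option (Nat × List Char)) (y : List Char) : pvMerge (shiftO a) (some (0, y)) = some (0, y) := by
  rcases a with _ | ⟨i, x⟩
  · rfl
  · simp [shiftO, pvMerge]

lemma lineValP_cons (p : List Char) (ps : List (List Char)) (l : List Char) :
    lineValP (p :: ps) l = if PySem.Chars.isIn p (PySem.Chars.upper l) then some (0, PySem.Chars.strip l) else shiftO (lineValP ps l) := by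
  rw [lineValP, List.findIdx?_cons]
  split_ifs with h
  · rfl
  · rw [lineValP, shiftO, Option.map_map, Option.map_map]
    rfl

lemma pureScan_cons_pat (p : List Char) (ps : List (List Char)) (lines : List (List Char)) :
    pureScan (p :: ps) lines =
      if lines.any (fun l => PySem.Chars.isIn p (PySem.Chars.upper l)) then
        (lines.find? (fun l => PySem.Chars.isIn p (PySem.Chars.upper l))).map (fun l => (0, PySem.Chars.strip l))
      else shiftO (pureScan ps lines) := by
  induction lines with
  | nil => rfl
  | cons l ls ih =>
    show pvMerge (lineValP (p :: ps) l) (pureScan (p :: ps) ls) = _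
    by_cases hm : PySem.Chars.isIn p (PySem.Chars.upper l)
    · rw [lineValP_cons, if_pos hm, pvMerge_zero_left]
      simp [hm]
    · have hmf : PySem.Chars.isIn p (PySem.Chars.upper l) = false := by simpa using hm
      rw [lineValP_cons, if_neg hm, ih]
      simp only [List.any_cons, List.find?_cons, hmf, Bool.false_or]
      by_cases hA : ls.any (fun l => PySem.Chars.isIn p (PySem.Chars.upper l))
      · rw [if_pos hA, if_pos hA]
        obtain ⟨l0, hl0⟩ : ∃ l0, ls.find? (fun l => PySem.Chars.isIn p (PySem.Chars.upper l)) = some l0 := by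
          have := List.find?_isSome.mpr (by simpa [List.any_eq_true] using hA)
          exact Option.isSome_iff_exists.mp this
        rw [hl0, Option.map_some, pvMerge_shift_zero]
      · rw [if_neg hA, if_neg hA, pvMerge_shift]
        rfl

lemma pureScan_nil_pats (lines : List (List Char)) : pureScan [] lines = none := by
  induction lines with
  | nil => rfl
  | cons l ls ih => show pvMerge (lineValP [] l) (pureScan [] ls) = none; rw [ih]; rfl

lemma aFindStream_eq (ps : List (List Char)) (hg : ∀ p ∈ ps, goodPat p) (c lp fp : List Char) :
    aFindStream c (PySem.Chars.upper c) ps lp fp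
      = (pureScan ps (nlSplit (PySem.Chars.strip c))).map (fun x => lp ++ x.2) := by
  induction ps with
  | nil => rw [pureScan_nil_pats]; rfl
  | cons p ps ih =>
    rw [aFindStream, pureScan_cons_pat, splitOn_nl]
    rw [pattern_line_bridge p c (hg p (by simp))]
    by_cases hA : (nlSplit (PySem.Chars.strip c)).any (fun l => PySem.Chars.isIn p (PySem.Chars.upper l))
    · rw [if_pos hA, if_pos hA]
      obtain ⟨l0, hl0⟩ : ∃ l0, (nlSplit (PySem.Chars.strip c)).find? (fun l => PySem.Chars.isIn p (PySem.Chars.upper l)) = some l0 := by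
        have := List.find?_isSome.mpr (by simpa [List.any_eq_true] using hA)
        exact Option.isSome_iff_exists.mp this
      rw [hl0]
      rfl
    · rw [if_neg hA, if_neg hA, ih (fun q hq => hg q (by simp [hq]))]
      rcases pureScan ps (nlSplit (PySem.Chars.strip c)) with _ | ⟨j, y⟩ <;> rfl

lemma goodPats : ∀ p ∈ aqwaPatterns, goodPat p := by
  intro p hp
  fin_cases hp <;> exact ⟨by decide, by decide, by decide, by decide⟩

lemma stream_eq (c lp fp : List Char) :
    aFindStream c (PySem.Chars.upper c) aqwaPatterns lp fp
      = (bScan c).map (fun b => lp ++ b.2) := by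
  rw [aFindStream_eq aqwaPatterns goodPats, bScan, foldl_bLineStep, splitOn_nl]
  rfl

-- ===== VERDICT (by name: the statement is the Claim_ definition above) =====
theorem detect_aqwa_error_py_spec : Claim_equal_detect_aqwa_error_py := by
  intro stdout stderr return_code lis_content _
  unfold Spec_detect_aqwa_error_py detect_aqwa_error_py detect_aqwa_error_py_alt
  by_cases hrc : return_code ≠ 0
  · rw [if_pos hrc, if_pos hrc]
  · rw [if_neg hrc, if_neg hrc]
    have hstd : aFindStream stdout.toList (PySem.Chars.upper stdout.toList) aqwaPatterns [] ("AQWA error detected: ".toList)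
        = (if stdout.toList ≠ [] then bScan stdout.toList else none).map (fun b => ([] : List Char) ++ b.2) := by
      by_cases h0 : stdout.toList = []
      · rw [h0, if_neg (by simp)]
        decide
      · rw [if_pos h0, stream_eq]
    have hlis : (if lis_content.toList ≠ [] then
          aFindStream lis_content.toList (PySem.Chars.upper lis_content.toList) aqwaPatterns
            ("AQWA LIS: ".toList) ("AQWA LIS error: ".toList)
        else none)
        = (if lis_content.toList ≠ [] then bScan lis_content.toList else none).map (fun b => ("AQWA LIS: ".toList) ++ b.2) := by
      by_cases h0 : lis_content.toList = []
      · rw [if_neg (by simp [h0]), if_neg (by simp [h0])]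
        rfl
      · rw [if_pos h0, if_pos h0, stream_eq]
    rw [hstd, hlis]
    cases h1 : (if stdout.toList ≠ [] then bScan stdout.toList else none) with
    | some b => rfl
    | none =>
      simp only [Option.map_none]
      cases h2 : (if lis_content.toList ≠ [] then bScan lis_content.toList else none) with
      | some b => rfl
      | none => rfl
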